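-- pv_equiv track=rewrite | github.com/pypi-data/pypi-mirror-403 | packages/trueform/trueform-0.3.0.tar.gz/trueform-0.3.0/python/tests/test_connect_edges_to_paths.py | canonicalize_path
-- ===== SOURCE A (Python) =====
-- def canonicalize_path(path):
--     """
--     Canonicalize a path for comparison (handles both open and closed paths).
--
--     For closed paths (first == last), strips duplicate and finds canonical rotation.
--     For open paths, considers both forward and reverse directions.
--     """
--     if len(path) == 0:
--         return tuple()
--
--     path = list(path)
--
--     # Check if closed (first == last)
--     is_closed = len(path) > 1 and path[0] == path[-1]
--
--     if is_closed:
--         # Strip last element for closed path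
--         path = path[:-1]
--
--     n = len(path)
--     if n == 0:
--         return tuple()
--
--     # Find minimum element
--     min_val = min(path)
--     min_positions = [i for i, v in enumerate(path) if v == min_val]
--
--     candidates = []
--
--     if is_closed:
--         # For closed paths, try all rotations starting from min positions
--         for pos in min_positions:
--             # Forward direction
--             forward = tuple(path[(pos + i) % n] for i in range(n))
--             candidates.append(forward)
--
--             # Reverse direction
--             reverse = tuple(path[(pos - i) % n] for i in range(n))
--             candidates.append(reverse)
--     else:
--         # For open paths, try forward and reverse from start
--         candidates.append(tuple(path))
--         candidates.append(tuple(reversed(path)))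
--
--     return min(candidates)
-- ===== SOURCE B (Python) =====
-- def canonicalize_path(path):
--     path = list(path)
--     if not path:
--         return tuple()
--     if len(path) > 1 and path[0] == path[-1]:
--         core = path[:-1]
--         n = len(core)
--         doubled = core + core
--         rdoubled = core[::-1] + core[::-1]
--         candidates = [tuple(doubled[i:i + n]) for i in range(n)] \
--                    + [tuple(rdoubled[i:i + n]) for i in range(n)]
--         return min(candidates)
--     return min(tuple(path), tuple(path[::-1]))
-- ===== Notes on version B (the rewrite author's own statement) =====
-- stated objective: alternative
-- what changed: A searches for the minimum element's positions and builds each forward/reverse candidate by per-element modular indexing from every such position; B drops the min-position search entirely and takes the minimum over all rotations of the core and of its reversal, read off as contiguous slices of a doubled list (for open paths, min of the list and its reverse).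
import Mathlib
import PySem

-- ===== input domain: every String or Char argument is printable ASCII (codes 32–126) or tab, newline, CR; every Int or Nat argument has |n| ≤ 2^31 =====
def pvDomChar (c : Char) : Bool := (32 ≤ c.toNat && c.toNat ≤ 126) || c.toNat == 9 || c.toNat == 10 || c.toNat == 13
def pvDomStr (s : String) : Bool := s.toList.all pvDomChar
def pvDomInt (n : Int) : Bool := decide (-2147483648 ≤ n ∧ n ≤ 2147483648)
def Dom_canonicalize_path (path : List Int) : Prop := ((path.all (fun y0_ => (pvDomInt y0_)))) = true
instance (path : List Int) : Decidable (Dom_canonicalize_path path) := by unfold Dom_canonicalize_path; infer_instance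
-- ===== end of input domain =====

-- B replaces A's min-position candidate construction (modular indexing from each minimum)
-- by the plain "all rotations via a doubled list" scheme; same exact value, simpler code (objective: alternative).

-- ===== PORT A =====
-- literal port of A: find min positions, build forward/reverse rotations by modular indexing, take min
def canonicalize_path (path : List Int) : List Int :=
  if path.length = 0 then []
  else
    let is_closed : Bool := decide (path.length > 1) && (PySem.List.pyGetD path 0 0 == PySem.List.pyGetD path (-1) 0)
    let path1 : List Int := if is_closed then PySem.List.slice path none (some (-1)) else path
    let n : Nat := path1.length
    if n = 0 then []
    else
      let min_val : Int := (PySem.List.min? path1 (fun x => x)).getD 0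
      let min_positions : List Int := ((PySem.List.enumerate path1).filter (fun p => p.2 == min_val)).map (fun p => p.1)
      let candidates : List (List Int) :=
        if is_closed then
          min_positions.foldl (fun acc pos =>
            let forward := (PySem.List.pyRange 0 (n : Int) 1).map
              (fun i => PySem.List.pyGetD path1 (PySem.Int.mod (pos + i) (n : Int)) 0)
            let reverse := (PySem.List.pyRange 0 (n : Int) 1).map
              (fun i => PySem.List.pyGetD path1 (PySem.Int.mod (pos - i) (n : Int)) 0)
            acc ++ [forward] ++ [reverse]) []
        else
          [path1, path1.reverse]  -- tuple(reversed(path)) ported as List.reverse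
      (PySem.List.min? candidates (fun x => x)).getD []

-- ===== PORT B =====
-- literal port of B: all rotations of core and of its reverse, read off a doubled list; min of the lot
def canonicalize_path_alt (path : List Int) : List Int :=
  if path = [] then []
  else if decide (path.length > 1) && (PySem.List.pyGetD path 0 0 == PySem.List.pyGetD path (-1) 0) then
    let core : List Int := PySem.List.slice path none (some (-1))
    let n : Nat := core.length
    let doubled : List Int := core ++ core
    let rdoubled : List Int := core.reverse ++ core.reverse   -- core[::-1] ported as List.reverse
    let candidates : List (List Int) :=
      (PySem.List.pyRange 0 (n : Int) 1).map (fun i => PySem.List.slice doubled (some i) (some (i + n)))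
      ++ (PySem.List.pyRange 0 (n : Int) 1).map (fun i => PySem.List.slice rdoubled (some i) (some (i + n)))
    (PySem.List.min? candidates (fun x => x)).getD []
  else
    min path path.reverse   -- Python min(a, b)

-- ===== PRECONDITION & SPEC =====
def Spec_canonicalize_path (path : List Int) (out : List Int) : Prop := out = canonicalize_path_alt path
instance (path : List Int) (out : List Int) : Decidable (Spec_canonicalize_path path out) := by unfold Spec_canonicalize_path; infer_instance

-- ===== CLAIM (what is proved, stated in full; the proofs are below) =====
def Claim_equal_canonicalize_path : Prop := ∀ (path : List Int), Dom_canonicalize_path path → Spec_canonicalize_path path (canonicalize_path path)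

-- ===== LEMMAS AND PROOFS =====

-- rotation of a list by i places
def pvRot (xs : List Int) (i : Nat) : List Int := xs.drop i ++ xs.take i

theorem pvRot_getElem (xs : List Int) (i k : Nat) (hi : i ≤ xs.length) (hk : k < xs.length) :
    (pvRot xs i)[k]'(by simp [pvRot]; omega) = xs[(i + k) % xs.length]'(Nat.mod_lt _ (by omega)) := by
  unfold pvRot
  rw [List.getElem_append]
  split
  · rename_i h'
    simp only [List.length_drop] at h'
    have hm : (i + k) % xs.length = i + k := Nat.mod_eq_of_lt (by omega)
    simp only [List.getElem_drop, hm]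
  · rename_i h'
    simp only [List.length_drop] at h'
    have hm : (i + k) % xs.length = i + k - xs.length := by
      rw [Nat.mod_eq_sub_mod (by omega), Nat.mod_eq_of_lt (by omega)]
    have he : k - (xs.length - i) = i + k - xs.length := by omega
    simp only [List.getElem_take, hm, List.length_drop, he]

-- B's slice of the doubled list is a rotation
theorem pv_slice_doubled (xs : List Int) (i : Nat) (h : i ≤ xs.length) :
    ((xs ++ xs).drop i).take xs.length = pvRot xs i := by
  rw [List.drop_append, List.take_append]
  have h1 : i - xs.length = 0 := by omega
  rw [h1]
  simp only [List.drop_zero]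
  rw [List.take_of_length_le (by simp)]
  unfold pvRot
  congr 1
  simp
  omega

-- A's forward candidate is a rotation
theorem pv_fwd_rot (xs : List Int) (p : Nat) (h : p < xs.length) :
    (PySem.List.pyRange 0 (xs.length : Int) 1).map
      (fun i => PySem.List.pyGetD xs (PySem.Int.mod ((p : Int) + i) (xs.length : Int)) 0)
      = pvRot xs p := by
  apply List.ext_getElem
  · simp [PySem.List.length_pyRange_one, pvRot]; omega
  · intro k h1 h2
    have hk : k < xs.length := by simpa [PySem.List.length_pyRange_one] using h1
    rw [List.getElem_map, PySem.List.getElem_pyRange_one]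
    rw [PySem.Int.mod_eq_emod_of_pos (by omega : (0:Int) < (xs.length:Int))]
    have hm : ((p : Int) + ((0:Int) + (k : Int))) % (xs.length : Int)
        = (((p + k) % xs.length : Nat) : Int) := by
      push_cast [Int.natCast_mod]
      ring_nf
    rw [hm, PySem.List.pyGetD_natCast, pvRot_getElem xs p k (by omega) hk]
    rw [List.getD_eq_getElem _ _ (Nat.mod_lt _ (by omega))]

-- A's reverse candidate is a rotation of the reversed list
theorem pv_rev_rot (xs : List Int) (p : Nat) (h : p < xs.length) :
    (PySem.List.pyRange 0 (xs.length : Int) 1).map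
      (fun i => PySem.List.pyGetD xs (PySem.Int.mod ((p : Int) - i) (xs.length : Int)) 0)
      = pvRot xs.reverse (xs.length - 1 - p) := by
  apply List.ext_getElem
  · simp [PySem.List.length_pyRange_one, pvRot]; omega
  · intro k h1 h2
    have hn : 0 < xs.length := by omega
    have hk : k < xs.length := by simpa [PySem.List.length_pyRange_one] using h1
    rw [List.getElem_map, PySem.List.getElem_pyRange_one]
    rw [PySem.Int.mod_eq_emod_of_pos (by omega : (0:Int) < (xs.length:Int))]
    set n := xs.length with hnn
    set r := (n - 1 - p + k) % n with hr
    have hrlt : r < n := Nat.mod_lt _ hn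
    have hkey : ((p : Int) - ((0:Int) + k)) % (n : Int) = ((n : Int) - 1 - r) := by
      have hc : ((n : Int) - 1 - r) % n = ((n : Int) - 1 - r) :=
        Int.emod_eq_of_lt (by omega) (by omega)
      rw [Int.emod_eq_emod_iff_emod_sub_eq_zero.mpr, hc]
      have hm : ((n - 1 - p + k : Nat) : Int) = (n : Int) - 1 - p + k := by push_cast; omega
      have hrc : (r : Int) = ((n - 1 - p + k : Nat) : Int) % (n : Int) := by
        rw [hr]; push_cast [Int.natCast_mod]; ring
      have hd : ((p:Int) - (0 + k)) - ((n:Int) - 1 - r) = (r : Int) - ((n - 1 - p + k : Nat) : Int) := by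
        rw [hm]; ring
      rw [hd, hrc, Int.sub_emod, Int.emod_emod_of_dvd _ (dvd_refl _)]
      simp
    rw [hkey]
    have ht : ((n : Int) - 1 - r).toNat = n - 1 - r := by omega
    have hg : PySem.List.pyGetD xs ((n : Int) - 1 - r) 0 = xs[n - 1 - r]'(by omega) := by
      rw [PySem.List.pyGetD_eq_getElem _ _ (by omega) (by omega)]
      simp only [ht]
    rw [hg, pvRot_getElem xs.reverse (n - 1 - p) k (by simp; omega) (by simp; omega)]
    rw [List.getElem_reverse]
    simp only [List.length_reverse, ← hnn, ← hr]

-- a rotation's head, when the start index is in range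
theorem pvRot_head (xs : List Int) (i : Nat) (h : i < xs.length) :
    pvRot xs i = xs[i] :: (xs.drop (i+1) ++ xs.take i) := by
  unfold pvRot
  rw [List.drop_eq_getElem_cons h, List.cons_append]

-- instance plumbing: min?_isMin specialised to key = id on List Int
theorem pv_min_isMin {xs : List (List Int)} {a : List Int}
    (ha : PySem.List.min? xs (fun x => x) = some a) : ∀ y ∈ xs, a ≤ y := by
  have eD : (fun (a b : List ℤ) => a.decidableLT b) = (LinearOrder.toDecidableLT (α := List ℤ)) :=
    Subsingleton.elim _ _
  rw [eD] at ha
  exact fun y hy => by simpa using PySem.List.min?_isMin ha y hy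

-- min?_isMin specialised to key = id on Int
theorem pv_min_isMin_int {xs : List Int} {a : Int}
    (ha : PySem.List.min? xs (fun x => x) = some a) : ∀ y ∈ xs, a ≤ y :=
  fun y hy => by simpa using PySem.List.min?_isMin ha y hy

-- two mins agree when each list dominates the other
theorem pv_min_eq {xs ys : List (List Int)} {a b : List Int}
    (ha : PySem.List.min? xs (fun x => x) = some a)
    (hb : PySem.List.min? ys (fun x => x) = some b)
    (hxy : ∀ x ∈ xs, ∃ y ∈ ys, y ≤ x) (hyx : ∀ y ∈ ys, ∃ x ∈ xs, x ≤ y) : a = b := by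
  obtain ⟨y, hy, hle⟩ := hxy a (PySem.List.min?_mem ha)
  obtain ⟨x, hx, hle'⟩ := hyx b (PySem.List.min?_mem hb)
  exact le_antisymm (le_trans (pv_min_isMin ha x hx) hle') (le_trans (pv_min_isMin hb y hy) hle)

-- membership in enumerate
theorem pv_mem_enumerate {xs : List Int} {s : Int} {p : Int × Int} :
    p ∈ PySem.List.enumerate xs s ↔ ∃ k : Nat, k < xs.length ∧ p.1 = s + k ∧ xs[k]? = some p.2 := by
  induction xs generalizing s with
  | nil => simp [PySem.List.enumerate_nil]
  | cons x t ih =>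
    rw [PySem.List.enumerate_cons]
    simp only [List.mem_cons, ih, List.length_cons]
    constructor
    · rintro (rfl | ⟨k, hk, h1, h2⟩)
      · exact ⟨0, by omega, by simp, by simp⟩
      · exact ⟨k+1, by omega, by push_cast [h1]; ring, by simpa using h2⟩
    · rintro ⟨k, hk, h1, h2⟩
      cases k with
      | zero =>
        left
        simp at h2 h1
        cases p
        simp_all
      | succ k =>
        right
        exact ⟨k, by omega, by push_cast at h1 ⊢; omega, by simpa using h2⟩

-- the closed-path case: A's min over min-position rotations equals B's min over all rotations
theorem pv_closed_eq (core : List Int) (h0 : core ≠ []) :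
    (PySem.List.min? (
      ((((PySem.List.enumerate core).filter (fun p => p.2 == (PySem.List.min? core (fun x => x)).getD 0)).map (fun p => p.1)).foldl
        (fun acc pos =>
          acc ++ [(PySem.List.pyRange 0 (core.length : Int) 1).map
              (fun i => PySem.List.pyGetD core (PySem.Int.mod (pos + i) (core.length : Int)) 0)]
            ++ [(PySem.List.pyRange 0 (core.length : Int) 1).map
              (fun i => PySem.List.pyGetD core (PySem.Int.mod (pos - i) (core.length : Int)) 0)]) [])) (fun x => x)).getD []
    = (PySem.List.min? (
        (PySem.List.pyRange 0 (core.length : Int) 1).map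
          (fun i => PySem.List.slice (core ++ core) (some i) (some (i + (core.length : Int))))
        ++ (PySem.List.pyRange 0 (core.length : Int) 1).map
          (fun i => PySem.List.slice (core.reverse ++ core.reverse) (some i) (some (i + (core.length : Int))))) (fun x => x)).getD [] := by
  have hn0 : 0 < core.length := List.length_pos_iff.mpr h0
  obtain ⟨m, hm⟩ : ∃ m, PySem.List.min? core (fun x => x) = some m := by
    rcases Option.ne_none_iff_exists'.mp (fun hc => h0 ((PySem.List.min?_eq_none_iff core (fun x => x)).mp hc)) with ⟨a, ha⟩
    exact ⟨a, ha⟩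
  rw [hm]
  simp only [Option.getD_some]
  -- names for A's two candidate builders
  set F : Int → List Int := fun pos => (PySem.List.pyRange 0 (core.length : Int) 1).map
      (fun i => PySem.List.pyGetD core (PySem.Int.mod (pos + i) (core.length : Int)) 0) with hF
  set R : Int → List Int := fun pos => (PySem.List.pyRange 0 (core.length : Int) 1).map
      (fun i => PySem.List.pyGetD core (PySem.Int.mod (pos - i) (core.length : Int)) 0) with hR
  set P : List Int := ((PySem.List.enumerate core).filter (fun p => p.2 == m)).map (fun p => p.1) with hP
  have hPmem : ∀ q : Int, q ∈ P ↔ ∃ k : Nat, k < core.length ∧ q = (k : Int) ∧ core[k]? = some m := by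
    intro q
    simp only [hP, List.mem_map, List.mem_filter]
    constructor
    · rintro ⟨⟨i, v⟩, ⟨hin, hv⟩, rfl⟩
      rcases pv_mem_enumerate.mp hin with ⟨k, hk, h1, h2⟩
      simp only [beq_iff_eq] at hv
      subst hv
      exact ⟨k, hk, by simpa using h1, h2⟩
    · rintro ⟨k, hk, rfl, h2⟩
      exact ⟨((k : Int), m), ⟨pv_mem_enumerate.mpr ⟨k, hk, by simp, h2⟩, by simp⟩, rfl⟩
  -- A's candidate list is a flatMap of rotations
  have hAf : (P.foldl (fun acc pos => acc ++ [F pos] ++ [R pos]) []) = P.flatMap (fun pos => [F pos] ++ [R pos]) := by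
    have hfn : (fun (acc : List (List Int)) pos => acc ++ [F pos] ++ [R pos])
        = (fun acc pos => acc ++ ([F pos] ++ [R pos])) := by
      funext acc pos; rw [List.append_assoc]
    rw [hfn, PySem.List.foldl_append_eq_flatMap]
    rfl
  rw [hAf]
  -- B's candidate list is the list of all rotations
  have hBf : ((PySem.List.pyRange 0 (core.length : Int) 1).map
          (fun i => PySem.List.slice (core ++ core) (some i) (some (i + (core.length : Int))))
        ++ (PySem.List.pyRange 0 (core.length : Int) 1).map
          (fun i => PySem.List.slice (core.reverse ++ core.reverse) (some i) (some (i + (core.length : Int)))))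
      = (List.range core.length).map (fun k => pvRot core k)
        ++ (List.range core.length).map (fun k => pvRot core.reverse k) := by
    rw [PySem.List.pyRange_one]
    simp only [List.map_map, Int.sub_zero, Int.toNat_natCast]
    congr 1
    · apply List.map_congr_left
      intro k hk
      simp only [Function.comp, zero_add]
      rw [PySem.List.slice_natCast_add, pv_slice_doubled core k (le_of_lt (List.mem_range.mp hk))]
    · apply List.map_congr_left
      intro k hk
      simp only [Function.comp, zero_add]
      rw [PySem.List.slice_natCast_add]
      rw [show core.length = core.reverse.length from (List.length_reverse).symm]
      exact pv_slice_doubled core.reverse k (by simp; exact le_of_lt (List.mem_range.mp hk))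
  rw [hBf]
  obtain ⟨k0, hk0, hck0⟩ : ∃ k0, ∃ _ : k0 < core.length, core[k0] = m := by
    rcases List.mem_iff_getElem.mp (PySem.List.min?_mem hm) with ⟨k0, hk0, he⟩
    exact ⟨k0, hk0, he⟩
  have hk0P : ((k0 : Int)) ∈ P :=
    (hPmem _).mpr ⟨k0, hk0, rfl, by rw [List.getElem?_eq_getElem hk0, hck0]⟩
  have hmle : ∀ y ∈ core, m ≤ y := pv_min_isMin_int hm
  have hFrot : ∀ k : Nat, k < core.length → F (k : Int) = pvRot core k := by
    intro k hk; rw [hF]; exact pv_fwd_rot core k hk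
  have hRrot : ∀ k : Nat, k < core.length → R (k : Int) = pvRot core.reverse (core.length - 1 - k) := by
    intro k hk; rw [hR]; exact pv_rev_rot core k hk
  have hAne : (P.flatMap fun pos => [F pos] ++ [R pos]) ≠ [] :=
    List.ne_nil_of_mem (List.mem_flatMap.mpr
      ⟨(k0 : Int), hk0P, List.mem_append_left _ (List.mem_singleton_self _)⟩)
  have hBne : ((List.range core.length).map (fun k => pvRot core k)
      ++ (List.range core.length).map (fun k => pvRot core.reverse k)) ≠ [] :=
    List.ne_nil_of_mem (List.mem_append_left _
      (List.mem_map.mpr ⟨0, List.mem_range.mpr hn0, rfl⟩))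
  obtain ⟨a, ha⟩ := Option.ne_none_iff_exists'.mp
    (fun hc => hAne ((PySem.List.min?_eq_none_iff _ (fun x => x)).mp hc))
  obtain ⟨b, hb⟩ := Option.ne_none_iff_exists'.mp
    (fun hc => hBne ((PySem.List.min?_eq_none_iff _ (fun x => x)).mp hc))
  rw [ha, hb]
  simp only [Option.getD_some]
  apply pv_min_eq ha hb
  · intro x hx
    rcases List.mem_flatMap.mp hx with ⟨pos, hpos, hxin⟩
    rcases (hPmem pos).mp hpos with ⟨k, hk, rfl, hck⟩
    simp only [List.singleton_append, List.mem_cons, List.not_mem_nil, or_false] at hxin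
    refine ⟨x, ?_, le_refl x⟩
    rcases hxin with rfl | rfl
    · rw [hFrot k hk]
      exact List.mem_append_left _ (List.mem_map.mpr ⟨k, List.mem_range.mpr hk, rfl⟩)
    · rw [hRrot k hk]
      exact List.mem_append_right _ (List.mem_map.mpr ⟨core.length - 1 - k, List.mem_range.mpr (by omega), rfl⟩)
  · intro y hy
    rcases List.mem_append.mp hy with hyF | hyR
    · rcases List.mem_map.mp hyF with ⟨k, hkr, rfl⟩
      have hk : k < core.length := List.mem_range.mp hkr
      by_cases hckm : core[k] = m
      · refine ⟨pvRot core k, ?_, le_refl _⟩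
        exact List.mem_flatMap.mpr ⟨(k : Int),
          (hPmem _).mpr ⟨k, hk, rfl, by rw [List.getElem?_eq_getElem hk, hckm]⟩,
          by simp [hFrot k hk]⟩
      · have hlt : m < core[k] := lt_of_le_of_ne (hmle _ (List.getElem_mem hk)) (fun e => hckm e.symm)
        refine ⟨pvRot core k0, List.mem_flatMap.mpr ⟨(k0 : Int), hk0P, by simp [hFrot k0 hk0]⟩, ?_⟩
        rw [pvRot_head core k0 hk0, pvRot_head core k hk, hck0]
        exact le_of_lt (List.Lex.rel hlt)
    · rcases List.mem_map.mp hyR with ⟨k, hkr, rfl⟩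
      have hk : k < core.length := List.mem_range.mp hkr
      have hj : core.length - 1 - k < core.length := by omega
      by_cases hckm : core[core.length - 1 - k] = m
      · refine ⟨pvRot core.reverse k, ?_, le_refl _⟩
        refine List.mem_flatMap.mpr ⟨((core.length - 1 - k : Nat) : Int),
          (hPmem _).mpr ⟨_, hj, rfl, by rw [List.getElem?_eq_getElem hj, hckm]⟩, ?_⟩
        have he : core.length - 1 - (core.length - 1 - k) = k := by omega
        simp [hRrot _ hj, he]
      · have hlt : m < core[core.length - 1 - k] :=
          lt_of_le_of_ne (hmle _ (List.getElem_mem hj)) (fun e => hckm e.symm)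
        refine ⟨pvRot core.reverse (core.length - 1 - k0),
          List.mem_flatMap.mpr ⟨(k0 : Int), hk0P, by simp [hRrot k0 hk0]⟩, ?_⟩
        rw [pvRot_head core.reverse (core.length - 1 - k0) (by simp; omega),
            pvRot_head core.reverse k (by simp [hk])]
        rw [List.getElem_reverse, List.getElem_reverse]
        have e0 : core.length - 1 - (core.length - 1 - k0) = k0 := by omega
        simp only [e0, hck0]
        exact le_of_lt (List.Lex.rel hlt)

theorem canonicalize_path_spec' : ∀ path : List Int, canonicalize_path path = canonicalize_path_alt path := by
  intro path
  by_cases hnil : path = []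
  · subst hnil; rfl
  · have hlen : ¬ path.length = 0 := by simpa [List.length_eq_zero_iff] using hnil
    by_cases h2 : (decide (path.length > 1) && (PySem.List.pyGetD path 0 0 == PySem.List.pyGetD path (-1) 0)) = true
    · have hgt : 1 < path.length := by
        have := (Bool.and_eq_true _ _).mp h2 |>.1
        simpa using this
      have hcore : (PySem.List.slice path none (some (-1))).length = path.length - 1 := by
        rw [PySem.List.slice_to_neg_one, List.length_dropLast]
      have hne : PySem.List.slice path none (some (-1)) ≠ [] := by
        intro hc
        rw [hc] at hcore
        simp at hcore
        omega
      simp only [canonicalize_path, canonicalize_path_alt, if_neg hlen, if_neg hnil, h2,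
        if_true, if_neg (by omega : ¬ (PySem.List.slice path none (some (-1))).length = 0)]
      exact pv_closed_eq _ hne
    · simp only [canonicalize_path, canonicalize_path_alt, if_neg hnil, h2,
        if_false, if_neg hlen, Bool.false_eq_true]
      have eD : (fun (a b : List ℤ) => a.decidableLT b) = (LinearOrder.toDecidableLT (α := List ℤ)) :=
        Subsingleton.elim _ _
      rw [eD, PySem.List.min?_id_cons]
      simp

-- ===== VERDICT (by name: the statement is the Claim_ definition above) =====
theorem canonicalize_path_spec : Claim_equal_canonicalize_path := by
  intro path _
  unfold Spec_canonicalize_path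
  exact canonicalize_path_spec' path
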